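-- pv_equiv track=rewrite | github.com/Riceand/my_cdm | cdmlib.py | find_last_value_y
-- ===== SOURCE A (Python) =====
-- def find_last_value_y(col_all_vals):
--     last_index = len(col_all_vals) - 1
--     last = col_all_vals[last_index]
--     if last == '':
--         col_all_vals.pop()
--         return find_last_value_y(col_all_vals)
--     else:
--         # y_to need + 1, not just the index
--         return last_index + 1
-- ===== SOURCE B (Python) =====
-- def find_last_value_y(col_all_vals):
--     # Non-mutating backward index scan (A pops trailing '' in place; return value
--     # is what is claimed equivalent). Returns 0 where A raises IndexError.
--     i = len(col_all_vals)
--     while i > 0 and col_all_vals[i - 1] == '':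
--         i -= 1
--     return i
-- ===== Notes on version B (the rewrite author's own statement) =====
-- stated objective: simpler
-- what changed: Replaced the recursion that pops trailing empty strings off the list with a single non-mutating backward index scan returning the position after the last non-empty value; B does not mutate the argument.
-- crash fix: A raises IndexError when the list is empty or contains only empty strings (last_index reaches -1 on an empty list); B returns 0 there. — e.g. on find_last_value_y([""]): A raises IndexError, B returns 0
import Mathlib
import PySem

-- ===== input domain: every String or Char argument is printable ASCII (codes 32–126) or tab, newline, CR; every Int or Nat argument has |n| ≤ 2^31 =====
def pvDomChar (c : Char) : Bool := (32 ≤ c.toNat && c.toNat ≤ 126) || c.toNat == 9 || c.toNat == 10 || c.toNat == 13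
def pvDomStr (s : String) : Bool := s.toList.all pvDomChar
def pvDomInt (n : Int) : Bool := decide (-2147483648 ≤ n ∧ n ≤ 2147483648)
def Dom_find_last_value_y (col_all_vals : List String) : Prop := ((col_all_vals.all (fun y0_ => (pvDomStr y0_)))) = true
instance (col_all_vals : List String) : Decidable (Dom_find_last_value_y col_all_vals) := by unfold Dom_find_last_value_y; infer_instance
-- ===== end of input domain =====

-- B replaces A's pop-and-recurse on the list tail with a non-mutating backward
-- index scan (simpler decomposition); equivalence is about the RETURN value only —
-- A pops trailing empty strings off its argument in place, B does not mutate it.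

-- ===== PORT A =====
def find_last_value_y (col_all_vals : List String) : Int :=
  let last_index : Int := (col_all_vals.length : Int) - 1
  match h : PySem.List.pyGet? col_all_vals last_index with
  | none => 0          -- IndexError in Python; excluded by Pre_
  | some last =>
    if last = "" then find_last_value_y col_all_vals.dropLast   -- .pop() then recurse
    else last_index + 1
termination_by col_all_vals.length
decreasing_by
  cases col_all_vals with
  | nil => simp [PySem.List.pyGet?, PySem.List.pyIdx?] at h
  | cons x xs => simp [List.length_dropLast]

-- ===== PORT B =====
-- while i > 0 and col_all_vals[i-1] == '': i -= 1  — recursion on the counter i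
def altLoop (col_all_vals : List String) : Nat → Int
  | 0 => 0
  | i + 1 =>
    if col_all_vals.getD i "" = "" then altLoop col_all_vals i
    else ((i : Int) + 1)

def find_last_value_y_alt (col_all_vals : List String) : Int :=
  altLoop col_all_vals col_all_vals.length

-- ===== PRECONDITION & SPEC =====
-- Pre_: Python A raises IndexError when the list is empty or all its entries are '';
-- Pre_ admits exactly the inputs with at least one non-empty value.
def Pre_find_last_value_y (col_all_vals : List String) : Prop :=
  ∃ s ∈ col_all_vals, s ≠ ""
instance (col_all_vals : List String) : Decidable (Pre_find_last_value_y col_all_vals) := by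
  unfold Pre_find_last_value_y; infer_instance
def pvWitness_find_last_value_y : List String := ["a"]

-- A raises IndexError on empty or all-empty lists; B returns 0 there.
def Raises_find_last_value_y (col_all_vals : List String) : Prop :=
  ∀ s ∈ col_all_vals, s = ""
instance (col_all_vals : List String) : Decidable (Raises_find_last_value_y col_all_vals) := by
  unfold Raises_find_last_value_y; infer_instance
def pvRaiseWitness_find_last_value_y : List String := [""]
def pvRaiseWitnessOut_find_last_value_y : Int := 0

def Spec_find_last_value_y (col_all_vals : List String) (out : Int) : Prop :=
  out = find_last_value_y_alt col_all_vals
instance (col_all_vals : List String) (out : Int) : Decidable (Spec_find_last_value_y col_all_vals out) := by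
  unfold Spec_find_last_value_y; infer_instance

-- ===== CLAIM (what is proved, stated in full; the proofs are below) =====
def Claim_equal_find_last_value_y : Prop := ∀ (col_all_vals : List String), Dom_find_last_value_y col_all_vals → Pre_find_last_value_y col_all_vals → Spec_find_last_value_y col_all_vals (find_last_value_y col_all_vals)
def Claim_raises_find_last_value_y : Prop := (∀ (col_all_vals : List String), Dom_find_last_value_y col_all_vals → Raises_find_last_value_y col_all_vals → ¬ Pre_find_last_value_y col_all_vals) ∧ (Dom_find_last_value_y (pvRaiseWitness_find_last_value_y) ∧ Raises_find_last_value_y (pvRaiseWitness_find_last_value_y) ∧ find_last_value_y_alt (pvRaiseWitness_find_last_value_y) = pvRaiseWitnessOut_find_last_value_y)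

-- ===== LEMMAS AND PROOFS =====

-- altLoop only looks at indices < i, so an appended last element is invisible below it
theorem altLoop_append (l : List String) (a : String) (i : Nat) (h : i ≤ l.length) :
    altLoop (l ++ [a]) i = altLoop l i := by
  induction i with
  | zero => rfl
  | succ i ih =>
    have hi : i < l.length := by omega
    simp only [altLoop, List.getD, List.getElem?_append_left hi]
    rw [ih (by omega)]
    rfl


-- the two ports agree on EVERY list (both return 0 where Python A raises)
theorem ports_agree : ∀ (l : List String), find_last_value_y l = find_last_value_y_alt l := by
  intro l
  induction l using List.reverseRecOn with
  | nil =>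
    rw [find_last_value_y]
    rfl
  | append_singleton l a ih =>
    have hget : PySem.List.pyGet? (l ++ [a]) (((l ++ [a]).length : Int) - 1) = some a := by
      rw [show (((l ++ [a]).length : Int) - 1) = (l.length : Int) by simp]
      rw [PySem.List.pyGet?_natCast]
      simp
    unfold find_last_value_y find_last_value_y_alt
    dsimp only
    split
    case _ h => rw [hget] at h; exact absurd h (by simp)
    case _ last h =>
    rw [hget] at h
    injection h with h
    subst h
    rw [show (l ++ [a]).dropLast = l by simp,
        show (l ++ [a]).length = l.length + 1 by simp]
    simp only [altLoop, List.getD, List.getElem?_concat_length, Option.getD_some]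
    by_cases ha : a = ""
    · simp only [ha, if_pos rfl]
      rw [altLoop_append l "" l.length le_rfl]
      simpa [find_last_value_y_alt] using ih
    · simp [ha]

-- ===== VERDICT (by name: the statement is the Claim_ definition above) =====
theorem find_last_value_y_spec : Claim_equal_find_last_value_y := by
  intro l _ _
  unfold Spec_find_last_value_y
  exact ports_agree l

theorem find_last_value_y_raises : Claim_raises_find_last_value_y := by
  unfold Claim_raises_find_last_value_y
  constructor
  · intro l _ hall ⟨s, hs, hne⟩
    exact hne (hall s hs)
  · exact ⟨by decide, by decide, by decide⟩

-- self-check: the raise-witness value really is the one stated (uses find_last_value_y_raises)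
theorem pvRaiseWitnessOut_ok :
    find_last_value_y_alt pvRaiseWitness_find_last_value_y = pvRaiseWitnessOut_find_last_value_y :=
  find_last_value_y_raises.2.2.2
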